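-- pv_equiv track=rewrite | github.com/griffinbaker12/recursive-book-of-recursion | ch6/ch6.py | k_combos
-- ===== SOURCE A (Python) =====
-- def k_combos(str, k):
--     # base case here
--     if k == 0:
--         return [""]
--     elif str == "":
--         return [""]
--
--     hd = str[0]
--     tl = str[1:]
--
--     all_combos = []
--     tail_combos = k_combos(tl, k-1)
--     for tc in tail_combos:
--         all_combos.append(hd + tc)
--
--     all_combos.extend(k_combos(tl, k))
--
--     return all_combos
-- ===== SOURCE B (Python) =====
-- def k_combos(str, k):
--     # Bottom-up DP over suffixes: row[t] holds the combos of the suffix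
--     # starting at i when t characters have already been taken (budget k - t).
--     n = len(str)
--     row = [[""]] * (n + 1)          # suffix i = n: always [""]
--     for i in range(n - 1, -1, -1):
--         ch = str[i]
--         row = [[""] if t == k
--                else [ch + x for x in row[t + 1]] + row[t]
--                for t in range(i + 1)]
--     return row[0]
-- ===== Notes on version B (the rewrite author's own statement) =====
-- stated objective: alternative
-- what changed: Replaced A's branching recursion (which re-solves each (suffix, budget) subproblem many times) by a bottom-up dynamic-programming loop that builds one row of suffix results per position and reads the answer from row[0].
import Mathlib
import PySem

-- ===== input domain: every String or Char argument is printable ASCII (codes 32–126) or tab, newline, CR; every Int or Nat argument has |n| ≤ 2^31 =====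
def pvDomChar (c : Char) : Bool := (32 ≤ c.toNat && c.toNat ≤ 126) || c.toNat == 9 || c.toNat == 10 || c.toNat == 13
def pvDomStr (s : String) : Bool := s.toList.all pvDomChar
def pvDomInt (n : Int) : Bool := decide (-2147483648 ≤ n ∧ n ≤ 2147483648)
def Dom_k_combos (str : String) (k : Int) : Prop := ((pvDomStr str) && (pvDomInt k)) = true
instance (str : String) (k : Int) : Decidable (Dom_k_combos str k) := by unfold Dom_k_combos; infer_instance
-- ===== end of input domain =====

-- B replaces A's branching recursion by a bottom-up DP over suffixes (objective: alternative).

-- ===== PORT A =====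
-- A's recursion, over the string's character list (hd = str[0], tl = str[1:]).
def kcA : List Char → Int → List String
  | l, k =>
    if k = 0 then [""]
    else
      match l with
      | [] => [""]
      | hd :: tl =>
        ((kcA tl (k - 1)).map (fun tc => String.singleton hd ++ tc)) ++ kcA tl k

def k_combos (str : String) (k : Int) : List String := kcA str.toList k

-- ===== PORT B =====
-- one iteration of Source B's loop body: the list comprehension over t in range(i+1)
def altStep (cs : List Char) (k : Int) (i : Nat) (row : List (List String)) :
    List (List String) :=
  (List.range (i + 1)).map (fun (t : Nat) =>
    if (t : Int) = k then [""]
    else ((row.getD (t + 1) []).map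
            (fun x => String.singleton (cs.getD i ' ') ++ x)) ++ row.getD t [])

-- Source B's 'for i in range(n-1, -1, -1)' loop, i = m-1 down to 0
def altLoop (cs : List Char) (k : Int) : Nat → List (List String) → List (List String)
  | 0, row => row
  | m + 1, row => altLoop cs k m (altStep cs k m row)

def k_combos_alt (str : String) (k : Int) : List String :=
  (altLoop str.toList k str.toList.length
    (List.replicate (str.toList.length + 1) [""])).getD 0 []

-- ===== PRECONDITION & SPEC =====
def Spec_k_combos (str : String) (k : Int) (out : List String) : Prop := out = k_combos_alt str k
instance (str : String) (k : Int) (out : List String) : Decidable (Spec_k_combos str k out) := by unfold Spec_k_combos; infer_instance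

-- ===== CLAIM (what is proved, stated in full; the proofs are below) =====
def Claim_equal_k_combos : Prop := ∀ (str : String) (k : Int), Dom_k_combos str k → Spec_k_combos str k (k_combos str k)

-- ===== LEMMAS AND PROOFS =====

-- the intended contents of B's row after the loop has processed down to index m
def rowOf (cs : List Char) (k : Int) (m : Nat) : List (List String) :=
  (List.range (m + 1)).map (fun (t : Nat) => kcA (cs.drop m) (k - (t : Int)))

theorem kcA_nil (k : Int) : kcA [] k = [""] := by
  unfold kcA; split <;> rfl

theorem rowOf_getD (cs : List Char) (k : Int) (m t : Nat) (h : t ≤ m) :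
    (rowOf cs k m).getD t [] = kcA (cs.drop m) (k - (t : Int)) := by
  simp [rowOf, List.getD, Nat.lt_succ_of_le h]

theorem replicate_eq_rowOf (cs : List Char) (k : Int) :
    List.replicate (cs.length + 1) [""] = rowOf cs k cs.length := by
  unfold rowOf
  rw [List.drop_length]
  simp [kcA_nil]

theorem altStep_rowOf (cs : List Char) (k : Int) (i : Nat) (h : i < cs.length) :
    altStep cs k i (rowOf cs k (i + 1)) = rowOf cs k i := by
  unfold altStep
  rw [show rowOf cs k i
        = (List.range (i + 1)).map (fun (t : Nat) => kcA (cs.drop i) (k - (t : Int))) from rfl]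
  apply List.map_congr_left
  intro t ht
  have ht' : t ≤ i := by simpa [Nat.lt_succ_iff] using List.mem_range.mp ht
  rw [rowOf_getD cs k (i + 1) (t + 1) (by omega), rowOf_getD cs k (i + 1) t (by omega)]
  have hdrop : cs.drop i = cs[i] :: cs.drop (i + 1) := List.drop_eq_getElem_cons h
  have hget : cs.getD i ' ' = cs[i] := List.getD_eq_getElem cs ' ' h
  rw [hdrop, hget]
  show _ = kcA (cs[i] :: cs.drop (i + 1)) (k - (t : Int))
  rw [kcA]
  by_cases hk : (t : Int) = k
  · simp [hk]
  · have : ¬ (k - (t : Int) = 0) := by omega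
    simp only [this, if_neg hk, if_false]
    have : k - ((t : Nat) + 1 : Nat) = k - (t : Int) - 1 := by push_cast; ring
    rw [this]

theorem altLoop_rowOf (cs : List Char) (k : Int) :
    ∀ m, m ≤ cs.length → altLoop cs k m (rowOf cs k m) = rowOf cs k 0
  | 0, _ => rfl
  | m + 1, h => by
    rw [altLoop, altStep_rowOf cs k m (by omega), altLoop_rowOf cs k m (by omega)]

-- ===== VERDICT (by name: the statement is the Claim_ definition above) =====
theorem k_combos_spec : Claim_equal_k_combos := by
  intro str k _
  unfold Spec_k_combos k_combos k_combos_alt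
  rw [replicate_eq_rowOf str.toList k, altLoop_rowOf str.toList k _ le_rfl]
  simp [rowOf]
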